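-- pv_equiv track=rewrite | github.com/SergeiButchak/Python_Interview | Lesson_3/Task_3_3.py | get_dict
-- ===== SOURCE A (Python) =====
-- def get_dict(key_list, value_list):
--     res = dict()
--     for i in range(len(key_list)):
--         try:
--             res[key_list[i]] = value_list[i]
--         except IndexError:
--             res[key_list[i]] = None
--
--     return res
-- ===== SOURCE B (Python) =====
-- def get_dict(key_list, value_list):
--     pad = list(value_list) + [None] * (len(key_list) - len(value_list))
--     return dict(zip(key_list, pad))
-- ===== Notes on version B (the rewrite author's own statement) =====
-- stated objective: simpler
-- what changed: Replaces the index-with-try/except loop by precomputing a None-padded value list and building the dict in one dict(zip(...)) construction.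
import Mathlib
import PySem

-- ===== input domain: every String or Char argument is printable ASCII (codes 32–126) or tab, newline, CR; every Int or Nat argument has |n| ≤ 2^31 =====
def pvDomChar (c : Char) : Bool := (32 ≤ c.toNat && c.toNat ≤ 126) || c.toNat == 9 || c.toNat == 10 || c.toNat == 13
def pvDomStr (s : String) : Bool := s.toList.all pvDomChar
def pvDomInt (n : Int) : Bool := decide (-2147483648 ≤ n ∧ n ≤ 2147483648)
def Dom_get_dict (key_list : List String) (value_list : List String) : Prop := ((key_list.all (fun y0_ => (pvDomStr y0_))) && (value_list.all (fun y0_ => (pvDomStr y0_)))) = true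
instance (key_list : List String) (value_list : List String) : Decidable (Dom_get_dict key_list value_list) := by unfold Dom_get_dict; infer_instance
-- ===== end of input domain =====

-- B replaces the index-with-try/except loop by a padded value list zipped with the keys (objective: simpler).


-- ===== PORT A =====
def get_dict (key_list : List String) (value_list : List String) : List (String × Option String) :=
  ((PySem.List.pyRange 0 key_list.length 1).foldl
    (fun res i =>
      -- key_list[i] is always in range for i in range(len(key_list)); the none branch is unreachable
      match PySem.List.pyGet? key_list i with
      | some k => res.insert k (PySem.List.pyGet? value_list i)   -- try: value_list[i]; except IndexError: None
      | none => res)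
    PySem.Dict.empty).items

-- ===== PORT B =====
def get_dict_alt (key_list : List String) (value_list : List String) : List (String × Option String) :=
  let pad := value_list.map some ++ List.replicate (key_list.length - value_list.length) (none : Option String)
  ((key_list.zip pad).foldl (fun d p => d.insert p.1 p.2) PySem.Dict.empty).items

-- ===== PRECONDITION & SPEC =====
def Spec_get_dict (key_list : List String) (value_list : List String) (out : List (String × Option String)) : Prop := out = get_dict_alt key_list value_list
instance (key_list : List String) (value_list : List String) (out : List (String × Option String)) : Decidable (Spec_get_dict key_list value_list out) := by unfold Spec_get_dict; infer_instance

-- ===== CLAIM (what is proved, stated in full; the proofs are below) =====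
def Claim_equal_get_dict : Prop := ∀ (key_list : List String) (value_list : List String), Dom_get_dict key_list value_list → Spec_get_dict key_list value_list (get_dict key_list value_list)

-- ===== LEMMAS AND PROOFS =====

-- ===== VERDICT (by name: the statement is the Claim_ definition above) =====
lemma pyGet?_nil_none (i : Int) : PySem.List.pyGet? ([] : List String) i = none := by
  simp [PySem.List.pyGet?, PySem.List.pyIdx?]

lemma succ_cast (j : Nat) : ((j.succ : Nat) : Int) = ((j : Nat) : Int) + 1 := by
  push_cast; ring

lemma loop_eq (kl vl : List String) (d : PySem.Dict String (Option String)) :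
    (List.range kl.length).foldl
      (fun res (j : Nat) =>
        match PySem.List.pyGet? kl ((j : Nat) : Int) with
        | some k => res.insert k (PySem.List.pyGet? vl ((j : Nat) : Int))
        | none => res) d
    = (kl.zip (vl.map some ++ List.replicate (kl.length - vl.length) (none : Option String))).foldl
        (fun d p => d.insert p.1 p.2) d := by
  induction kl generalizing vl d with
  | nil => simp
  | cons k kt ih =>
    simp only [List.length_cons]
    rw [List.range_succ_eq_map]
    cases vl with
    | nil =>
      simp only [List.map_nil, List.nil_append, List.length_nil, Nat.sub_zero,
        List.replicate_succ, List.zip_cons_cons, List.foldl_cons, List.foldl_map,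
        Nat.cast_zero, PySem.List.pyGet?_zero_cons, pyGet?_nil_none]
      have h := ih [] (d.insert k none)
      simp only [List.map_nil, List.nil_append, List.length_nil, Nat.sub_zero, pyGet?_nil_none] at h
      rw [← h]
      refine List.foldl_ext _ _ _ (fun acc j hj => ?_)
      rw [succ_cast j, PySem.List.pyGet?_cons_succ]
    | cons v vt =>
      simp only [List.map_cons, List.cons_append, List.length_cons, Nat.succ_sub_succ,
        List.zip_cons_cons, List.foldl_cons, List.foldl_map,
        Nat.cast_zero, PySem.List.pyGet?_zero_cons]
      rw [← ih vt (d.insert k (some v))]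
      refine List.foldl_ext _ _ _ (fun acc j hj => ?_)
      rw [succ_cast j, PySem.List.pyGet?_cons_succ, PySem.List.pyGet?_cons_succ]

theorem get_dict_spec : Claim_equal_get_dict := by
  intro kl vl _
  unfold Spec_get_dict get_dict get_dict_alt
  rw [PySem.List.pyRange_one]
  simp only [Int.sub_zero, Int.toNat_natCast, List.foldl_map, Int.zero_add]
  rw [loop_eq]
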